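-- pv_equiv track=rewrite | github.com/CDBiddulph/scaffold-learning | experiments/crosswords_20250711_195402/scaffolds/8-3-1/scaffold.py | determine_down_lengths
-- ===== SOURCE A (Python) =====
-- def determine_down_lengths(grid):
--     """Determine the length of each down clue from the grid structure"""
--     if not grid:
--         return {}
--
--     height = len(grid)
--     width = len(grid[0]) if height > 0 else 0
--     lengths = {}
--     current_num = 1
--
--     for row in range(height):
--         for col in range(width):
--             if grid[row][col] == ".":
--                 continue
--
--             # Check if this position starts an across word
--             starts_across = (
--                 (col == 0 or grid[row][col - 1] == ".")
--                 and col + 1 < width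
--                 and grid[row][col + 1] != "."
--             )
--
--             # Check if this position starts a down word
--             starts_down = (
--                 (row == 0 or grid[row - 1][col] == ".")
--                 and row + 1 < height
--                 and grid[row + 1][col] != "."
--             )
--
--             if starts_across or starts_down:
--                 if starts_down:
--                     # Calculate length of down word
--                     length = 0
--                     for r in range(row, height):
--                         if grid[r][col] == ".":
--                             break
--                         length += 1
--                     lengths[current_num] = length
--                 current_num += 1
--
--     return lengths
-- ===== SOURCE B (Python) =====
-- def determine_down_lengths(grid):
--     """Determine the length of each down clue from the grid structure"""
--     if not grid:
--         return {}
--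
--     height = len(grid)
--     width = len(grid[0])
--
--     # Bottom-up DP: run[r][c] = length of the downward run of open cells starting at (r, c)
--     run = [[0] * width for _ in range(height)]
--     for r in range(height - 1, -1, -1):
--         for c in range(width):
--             if grid[r][c] != ".":
--                 run[r][c] = 1 + (run[r + 1][c] if r + 1 < height else 0)
--
--     lengths = {}
--     num = 1
--     for r in range(height):
--         for c in range(width):
--             if grid[r][c] == ".":
--                 continue
--             starts_down = (
--                 (r == 0 or grid[r - 1][c] == ".")
--                 and r + 1 < height
--                 and grid[r + 1][c] != "."
--             )
--             if starts_down:
--                 lengths[num] = run[r][c]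
--                 num += 1
--             elif (
--                 (c == 0 or grid[r][c - 1] == ".")
--                 and c + 1 < width
--                 and grid[r][c + 1] != "."
--             ):
--                 num += 1
--     return lengths
-- ===== Notes on version B (the rewrite author's own statement) =====
-- stated objective: alternative
-- what changed: Replaces A's per-down-start rescan of the column (inner loop over remaining rows) with a bottom-up dynamic-programming pass that precomputes every cell's downward run length, so each down start becomes a table lookup; the rescans disappear.
import Mathlib
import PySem

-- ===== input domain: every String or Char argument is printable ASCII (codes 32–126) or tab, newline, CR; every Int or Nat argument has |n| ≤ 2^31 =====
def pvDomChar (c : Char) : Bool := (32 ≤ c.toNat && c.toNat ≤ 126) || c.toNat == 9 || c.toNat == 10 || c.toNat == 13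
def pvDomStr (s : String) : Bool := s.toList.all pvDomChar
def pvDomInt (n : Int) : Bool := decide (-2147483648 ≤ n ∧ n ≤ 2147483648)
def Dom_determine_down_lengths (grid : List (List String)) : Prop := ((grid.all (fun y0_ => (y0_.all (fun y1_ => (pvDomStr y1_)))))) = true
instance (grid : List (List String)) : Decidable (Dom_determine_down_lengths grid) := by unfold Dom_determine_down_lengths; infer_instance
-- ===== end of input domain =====

-- B replaces A's per-down-start column rescan by a bottom-up precomputed run-length table of the grid; return values proved equal on grids whose rows are at least as long as the first row.


-- ===== PORT A =====
-- cell accessor: grid[r][c]; under Pre_ every access is in range, so the defaults are never used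
def pvCell (grid : List (List String)) (r c : Nat) : String :=
  (grid.getD r []).getD c ""

-- A's inner loop: `for r in range(row, height): if grid[r][col] == ".": break; length += 1`
def pvDownCount (grid : List (List String)) (col : Nat) : List Nat → Int
  | [] => 0
  | r :: rest => if pvCell grid r col == "." then 0 else 1 + pvDownCount grid col rest

def determine_down_lengths (grid : List (List String)) : List (Int × Int) :=
  if grid.isEmpty then [] else
  let height := grid.length
  let width := (grid.getD 0 []).length
  let st := (List.range height).foldl (fun st row =>
    (List.range width).foldl (fun (st : PySem.Dict Int Int × Int) col =>
      if pvCell grid row col == "." then st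
      else
        let starts_across := (col == 0 || pvCell grid row (col - 1) == ".")
          && decide (col + 1 < width) && !(pvCell grid row (col + 1) == ".")
        let starts_down := (row == 0 || pvCell grid (row - 1) col == ".")
          && decide (row + 1 < height) && !(pvCell grid (row + 1) col == ".")
        if starts_across || starts_down then
          let st1 := if starts_down then
              (st.1.insert st.2 (pvDownCount grid col (List.range' row (height - row))), st.2)
            else st
          (st1.1, st1.2 + 1)
        else st) st) ((PySem.Dict.empty : PySem.Dict Int Int), (1 : Int))
  st.1.items

-- ===== PORT B =====
-- B: bottom-up table; row r holds, for each c < width, the downward run length starting at (r, c)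
def pvRunRows (width : Nat) : List (List String) → List (List Int)
  | [] => []
  | row :: rest =>
    let below := pvRunRows width rest
    ((List.range width).map (fun c =>
      if row.getD c "" == "." then 0 else 1 + ((below.headD []).getD c 0))) :: below

def determine_down_lengths_alt (grid : List (List String)) : List (Int × Int) :=
  if grid.isEmpty then [] else
  let height := grid.length
  let width := (grid.getD 0 []).length
  let run := pvRunRows width grid
  ((List.range height).foldl (fun st row =>
    (List.range width).foldl (fun (st : PySem.Dict Int Int × Int) col =>
      if pvCell grid row col == "." then st
      else
        if (row == 0 || pvCell grid (row - 1) col == ".")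
            && decide (row + 1 < height) && !(pvCell grid (row + 1) col == ".") then
          (st.1.insert st.2 (((run.getD row []).getD col 0)), st.2 + 1)
        else if (col == 0 || pvCell grid row (col - 1) == ".")
            && decide (col + 1 < width) && !(pvCell grid row (col + 1) == ".") then
          (st.1, st.2 + 1)
        else st) st) ((PySem.Dict.empty : PySem.Dict Int Int), (1 : Int))).1.items

-- ===== PRECONDITION & SPEC =====
-- Pre_ excludes exactly the ragged grids on which Python A raises IndexError: some row
-- shorter than the first row (width); on those A (and B) crash, nothing is claimed.
def Pre_determine_down_lengths (grid : List (List String)) : Prop :=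
  ∀ r ∈ grid, (grid.headD []).length ≤ r.length
instance (grid : List (List String)) : Decidable (Pre_determine_down_lengths grid) := by
  unfold Pre_determine_down_lengths; infer_instance

def pvWitness_determine_down_lengths : List (List String) :=
  [["A", "B", "."], [".", "C", "D"], ["E", "F", "G"]]

def Spec_determine_down_lengths (grid : List (List String)) (out : List (Int × Int)) : Prop := out = determine_down_lengths_alt grid
instance (grid : List (List String)) (out : List (Int × Int)) : Decidable (Spec_determine_down_lengths grid out) := by unfold Spec_determine_down_lengths; infer_instance

-- ===== CLAIM (what is proved, stated in full; the proofs are below) =====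
def Claim_equal_determine_down_lengths : Prop := ∀ (grid : List (List String)), Dom_determine_down_lengths grid → Pre_determine_down_lengths grid → Spec_determine_down_lengths grid (determine_down_lengths grid)

-- ===== LEMMAS AND PROOFS =====

-- reference value: downward run length of open cells in column c starting at the head of `rows`
def pvColRun (c : Nat) : List (List String) → Int
  | [] => 0
  | row :: rest => if row.getD c "" == "." then 0 else 1 + pvColRun c rest

lemma pvRunRows_getD (width : Nat) (grid : List (List String)) (r c : Nat) (hc : c < width) :
    ((pvRunRows width grid).getD r []).getD c 0 = pvColRun c (grid.drop r) := by
  induction grid generalizing r with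
  | nil => cases r <;> simp [pvRunRows, pvColRun]
  | cons row rest ih =>
    cases r with
    | zero =>
      have hhead : ((pvRunRows width rest).headD []).getD c 0
          = ((pvRunRows width rest).getD 0 []).getD c 0 := by
        cases pvRunRows width rest <;> simp [List.getD]
      simp only [pvRunRows, List.getD_cons_zero, List.drop_zero, pvColRun]
      rw [List.getD_eq_getElem _ _ (by simpa using hc), List.getElem_map, List.getElem_range,
        hhead, ih 0]
      simp
    | succ r' =>
      simp only [pvRunRows, List.getD, List.getElem?_cons_succ, List.drop_succ_cons]
      exact ih r'

lemma pvDownCount_eq_colRun (grid : List (List String)) (col r : Nat) (hr : r ≤ grid.length) :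
    pvDownCount grid col (List.range' r (grid.length - r)) = pvColRun col (grid.drop r) := by
  have hgen : ∀ n r, r + n = grid.length →
      pvDownCount grid col (List.range' r n) = pvColRun col (grid.drop r) := by
    intro n
    induction n with
    | zero =>
      intro r h
      have : grid.drop r = [] := List.drop_eq_nil_of_le (by omega)
      simp [pvDownCount, this, pvColRun]
    | succ n ih =>
      intro r h
      have hrlt : r < grid.length := by omega
      have hdrop : grid.drop r = grid[r] :: grid.drop (r + 1) :=
        List.drop_eq_getElem_cons hrlt
      have hcell : pvCell grid r col = grid[r].getD col "" := by
        simp [pvCell, List.getD, List.getElem?_eq_getElem hrlt]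
      rw [List.range'_succ, hdrop]
      simp only [pvDownCount, pvColRun, hcell]
      rw [ih (r + 1) (by omega)]
  have := hgen (grid.length - r) r (by omega)
  exact this

lemma pvRun_lookup (grid : List (List String)) (row col : Nat) (hrow : row ≤ grid.length)
    (hcol : col < (grid.getD 0 []).length) :
    ((pvRunRows (grid.getD 0 []).length grid).getD row []).getD col 0
      = pvDownCount grid col (List.range' row (grid.length - row)) := by
  rw [pvRunRows_getD _ _ _ _ hcol, pvDownCount_eq_colRun _ _ _ hrow]

-- ===== VERDICT (by name: the statement is the Claim_ definition above) =====
theorem determine_down_lengths_spec : Claim_equal_determine_down_lengths := by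
  intro grid _ _
  unfold Spec_determine_down_lengths determine_down_lengths determine_down_lengths_alt
  by_cases hempty : grid.isEmpty
  · simp [hempty]
  · simp only [hempty, Bool.false_eq_true, if_false]
    refine congrArg (fun p : PySem.Dict Int Int × Int => PySem.Dict.items p.1) ?_
    apply PySem.List.foldl_congr_mem
    intro st row hrow
    apply PySem.List.foldl_congr_mem
    intro st' col hcol
    have hrow' : row < grid.length := List.mem_range.mp hrow
    have hcol' : col < (grid.getD 0 []).length := List.mem_range.mp hcol
    by_cases hdot : pvCell grid row col == "."
    · simp [hdot]
    · simp only [hdot, Bool.false_eq_true, if_false]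
      set sa := (col == 0 || pvCell grid row (col - 1) == ".")
        && decide (col + 1 < (grid.getD 0 []).length) && !(pvCell grid row (col + 1) == ".") with hsa
      set sd := (row == 0 || pvCell grid (row - 1) col == ".")
        && decide (row + 1 < grid.length) && !(pvCell grid (row + 1) col == ".") with hsd
      rw [pvRun_lookup grid row col (le_of_lt hrow') hcol']
      cases sd <;> cases sa <;> simp
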